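-- pv_equiv track=rewrite | github.com/alecmchiu/CS122 | Rosalind/cyclicchromosome.py | CyclicChromosomes2
-- ===== SOURCE A (Python) =====
-- def CyclicChromosomes2(reads):
-- 	s = len(reads)
-- 	cyclic_string = reads.pop()
-- 	single = len(cyclic_string)
-- 	while len(reads) != 0:
-- 		suffix = cyclic_string[len(cyclic_string)-single+1:]
-- 		for each in reads:
-- 			prefix = each[:-1]
-- 			if suffix == prefix:
-- 				cyclic_string += each[-1]
-- 				break
-- 		reads.remove(each)
-- 	return cyclic_string[:s]
-- ===== SOURCE B (Python) =====
-- # Same return value as A; like A it leaves `reads` empty on return (A pops every element).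
-- def CyclicChromosomes2(reads):
--     s = len(reads)
--     chrom = reads[-1]
--     single = len(chrom)
--     # index the remaining reads by their (len-1)-prefix; reversed so that
--     # stack.pop() yields the earliest remaining read with that prefix
--     buckets = {}
--     for r in reversed(reads[:-1]):
--         buckets.setdefault(r[:-1], []).append(r)
--     while True:
--         suffix = chrom[len(chrom) - single + 1:]
--         stack = buckets.get(suffix)
--         if not stack:
--             break
--         chrom += stack.pop()[-1]
--     del reads[:]
--     return chrom[:s]
-- ===== Notes on version B (the rewrite author's own statement) =====
-- stated objective: faster
-- what changed: Replaces the per-step linear rescan of all remaining reads (plus list.remove) with a dict built once that indexes reads by their overlap prefix into per-prefix stacks (stored reversed so pop() yields the earliest remaining read), making each extension one hash lookup/pop.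
import Mathlib
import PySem

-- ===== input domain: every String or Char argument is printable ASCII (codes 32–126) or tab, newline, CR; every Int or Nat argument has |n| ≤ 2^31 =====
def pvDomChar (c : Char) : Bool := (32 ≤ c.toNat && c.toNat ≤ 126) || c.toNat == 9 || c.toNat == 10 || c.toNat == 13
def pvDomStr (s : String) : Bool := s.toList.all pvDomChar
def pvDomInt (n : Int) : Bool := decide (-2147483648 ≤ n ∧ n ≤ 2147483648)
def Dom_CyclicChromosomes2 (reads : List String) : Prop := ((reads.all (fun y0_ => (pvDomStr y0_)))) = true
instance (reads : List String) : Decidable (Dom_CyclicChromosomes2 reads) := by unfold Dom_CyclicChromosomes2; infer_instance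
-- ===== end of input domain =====

-- B replaces A's per-step linear rescan of the remaining reads with a prefix-indexed
-- dict of stacks built once (objective: faster). Return-value equivalence; both A and B
-- leave `reads` empty on return.

-- ===== PORT A =====
-- the while-loop of A; fuel = current length of `reads` (each iteration removes exactly one read)
def pvALoop : Nat → Int → List Char → List (List Char) → List Char
  | n + 1, single, cyc, reads@(_ :: _) =>
      let suffix := PySem.List.slice cyc (some ((cyc.length : Int) - single + 1)) none
      match reads.find? (fun e => PySem.List.slice e none (some (-1)) == suffix) with
      | some e =>
          -- cyclic_string += each[-1]; reads.remove(each)  (each[-1] = none is IndexError, excluded by Pre_)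
          pvALoop n single (cyc ++ (PySem.List.pyGet? e (-1)).elim [] ([·]))
            ((PySem.List.remove? reads e).getD reads)
      | none =>
          -- for-loop fell through: each = last element; reads.remove(each)
          pvALoop n single cyc ((PySem.List.remove? reads (reads.getLast?.getD [])).getD reads)
  | _, _, cyc, _ => cyc   -- loop exit (reads empty); fuel 0 unreachable: fuel is the list length

def CyclicChromosomes2 (reads : List String) : String :=
  let rs := reads.map String.toList
  let s := rs.length
  match PySem.List.pop? rs (-1) with
  | none => ""          -- reads.pop() on []: IndexError, excluded by Pre_
  | some (cyc, rest) =>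
      String.ofList (PySem.List.slice (pvALoop rest.length (cyc.length : Int) cyc rest) none (some (s : Int)))

-- ===== PORT B =====
-- the while-True loop of B; fuel = number of reads (pops ≤ reads-1, so fuel never runs out)
def pvBLoop : Nat → Int → PySem.Dict (List Char) (List (List Char)) → List Char → List Char
  | 0, _, _, chrom => chrom
  | n + 1, single, buckets, chrom =>
      let suffix := PySem.List.slice chrom (some ((chrom.length : Int) - single + 1)) none
      match buckets.get? suffix with
      | none => chrom                    -- buckets.get(suffix) is None: break
      | some stack =>
          match stack.getLast? with
          | none => chrom                -- stack is empty: break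
          | some r =>                    -- chrom += stack.pop()[-1]  (r[-1] = none is IndexError, excluded by Pre_)
              pvBLoop n single (buckets.insert suffix stack.dropLast)
                (chrom ++ (PySem.List.pyGet? r (-1)).elim [] ([·]))

def CyclicChromosomes2_alt (reads : List String) : String :=
  let rs := reads.map String.toList
  let s := rs.length
  match rs.getLast? with
  | none => ""          -- reads[-1] on []: IndexError, excluded by Pre_
  | some chrom =>
      -- for r in reversed(reads[:-1]): buckets.setdefault(r[:-1], []).append(r)
      let buckets := ((PySem.List.slice rs none (some (-1))).reverse).foldl
          (fun d r => d.modify (PySem.List.slice r none (some (-1))) [] (· ++ [r]))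
          PySem.Dict.empty
      String.ofList (PySem.List.slice (pvBLoop rs.length (chrom.length : Int) buckets chrom) none (some (s : Int)))

-- ===== PRECONDITION & SPEC =====
-- Pre_ excludes exactly the inputs where A raises IndexError: the empty list (reads.pop()),
-- and inputs whose seed (last) read has length ≤ 1 — making the overlap suffix empty — while
-- an empty-string read is among the rest, so A inevitably reaches `each[-1]` on ''.
def Pre_CyclicChromosomes2 (reads : List String) : Prop :=
  reads ≠ [] ∧ ¬((reads.getLast?.getD "").length ≤ 1 ∧ "" ∈ reads.dropLast)
instance (reads : List String) : Decidable (Pre_CyclicChromosomes2 reads) := by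
  unfold Pre_CyclicChromosomes2; infer_instance

def pvWitness_CyclicChromosomes2 : List String := ["AB", "BA"]

def Spec_CyclicChromosomes2 (reads : List String) (out : String) : Prop := out = CyclicChromosomes2_alt reads
instance (reads : List String) (out : String) : Decidable (Spec_CyclicChromosomes2 reads out) := by
  unfold Spec_CyclicChromosomes2; infer_instance

-- ===== CLAIM (what is proved, stated in full; the proofs are below) =====
def Claim_equal_CyclicChromosomes2 : Prop := ∀ (reads : List String), Dom_CyclicChromosomes2 reads → Pre_CyclicChromosomes2 reads → Spec_CyclicChromosomes2 reads (CyclicChromosomes2 reads)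

-- ===== LEMMAS AND PROOFS =====

-- the match predicate of step (cyc, single): read r extends the chromosome
def pvPred (single : Int) (cyc : List Char) (r : List Char) : Bool :=
  PySem.List.slice r none (some (-1)) == PySem.List.slice cyc (some ((cyc.length : Int) - single + 1)) none

-- erasing the first match keeps exactly the tail of the filtered list, and leaves
-- every bucket the erased element does not belong to untouched
theorem pv_erase_filter {α : Type} [BEq α] [LawfulBEq α] (p : α → Bool) :
    ∀ (l : List α) (e : α), l.find? p = some e →
      (l.erase e).filter p = (l.filter p).tail ∧
      ∀ q : α → Bool, q e = false → (l.erase e).filter q = l.filter q := by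
  intro l
  induction l with
  | nil => intro e h; simp at h
  | cons x t ih =>
    intro e hf
    by_cases hx : p x = true
    · rw [List.find?_cons_of_pos hx] at hf
      cases hf
      refine ⟨?_, ?_⟩
      · simp [List.erase_cons_head, hx]
      · intro q hq; simp [List.erase_cons_head, hq]
    · rw [List.find?_cons_of_neg hx] at hf
      have hpe : p e = true := List.find?_some hf
      have hne : (x == e) = false := by
        cases h : x == e with
        | true => exact absurd (by rwa [(beq_iff_eq).mp h]) hx
        | false => rfl
      rw [List.erase_cons_tail (by simp [hne])]
      refine ⟨?_, ?_⟩
      · simp only [List.filter_cons, hx]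
        simpa [hx] using (ih e hf).1
      · intro q hq
        by_cases hqx : q x = true <;> simp [hqx, (ih e hf).2 q hq]

-- once no remaining read matches, A's loop drains the list without appending anything
theorem pvALoop_no_match :
    ∀ (n : Nat) (R : List (List Char)) (cyc : List Char) (single : Int),
      R.length = n → (∀ r ∈ R, pvPred single cyc r = false) →
      pvALoop n single cyc R = cyc := by
  intro n
  induction n with
  | zero => intro R cyc single hn _; rw [List.length_eq_zero_iff.mp hn]; rfl
  | succ n ih =>
    intro R cyc single hn hno
    match R, hn with
    | x :: t, hn =>
      have hfind : (x :: t).find? (fun e => PySem.List.slice e none (some (-1)) ==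
          PySem.List.slice cyc (some ((cyc.length : Int) - single + 1)) none) = none := by
        rw [List.find?_eq_none]
        intro r hr
        simpa [pvPred] using hno r hr
      have hlast : (x :: t).getLast?.getD [] ∈ x :: t := by
        rw [List.getLast?_eq_some_getLast (l := x :: t) (by simp)]
        exact List.getLast_mem _
      have hrem : (PySem.List.remove? (x :: t) ((x :: t).getLast?.getD [])).getD (x :: t)
          = (x :: t).erase ((x :: t).getLast?.getD []) := by
        rw [PySem.List.remove?_eq_some_erase _ _ hlast]; rfl
      rw [pvALoop]
      simp only [hfind, hrem]
      exact ih _ cyc single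
        (by rw [List.length_erase_of_mem hlast]; simpa using hn)
        (fun r hr => hno r (List.mem_of_mem_erase hr))

-- main loop correspondence: B's buckets hold, reversed, exactly the matches A would scan for
theorem pv_loop_eq :
    ∀ (n : Nat) (R : List (List Char)) (cyc : List Char) (single : Int)
      (d : PySem.Dict (List Char) (List (List Char))),
      R.length = n →
      (∀ p, d.getD p [] = (R.filter (fun r => PySem.List.slice r none (some (-1)) == p)).reverse) →
      pvALoop n single cyc R = pvBLoop (n + 1) single d cyc := by
  intro n
  induction n with
  | zero =>
    intro R cyc single d hn hinv
    rw [List.length_eq_zero_iff.mp hn]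
    show cyc = pvBLoop 1 single d cyc
    rw [pvBLoop]
    cases hg : d.get? (PySem.List.slice cyc (some ((cyc.length : Int) - single + 1)) none) with
    | none => rfl
    | some st =>
      have : st = [] := by
        have := hinv (PySem.List.slice cyc (some ((cyc.length : Int) - single + 1)) none)
        rw [List.length_eq_zero_iff.mp hn] at this
        simp only [List.filter_nil, List.reverse_nil] at this
        rw [show d.getD (PySem.List.slice cyc (some ((cyc.length : Int) - single + 1)) none) []
              = (d.get? (PySem.List.slice cyc (some ((cyc.length : Int) - single + 1)) none)).getD []
            from rfl, hg] at this
        simpa using this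
      rw [this]; rfl
  | succ n ih =>
    intro R cyc single d hn hinv
    match R, hn with
    | x :: t, hn =>
      set sfx := PySem.List.slice cyc (some ((cyc.length : Int) - single + 1)) none with hsfx
      have hgetD : d.getD sfx [] = (d.get? sfx).getD [] := rfl
      cases hF : (x :: t).filter (fun r => PySem.List.slice r none (some (-1)) == sfx) with
      | nil =>
        -- no match: A drains without appending, B breaks
        have hA : pvALoop (n + 1) single cyc (x :: t) = cyc :=
          pvALoop_no_match (n + 1) (x :: t) cyc single hn
            (fun r hr => by
              have := List.filter_eq_nil_iff.mp hF r hr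
              simpa [pvPred, hsfx] using this)
        rw [hA, pvBLoop]
        have hD : d.getD sfx [] = [] := by rw [hinv sfx, hF]; rfl
        cases hg : d.get? sfx with
        | none => rfl
        | some st =>
          have : st = [] := by rw [hgetD, hg] at hD; simpa using hD
          rw [this]; rfl
      | cons f fs =>
        -- f is A's first match and the top of B's stack for sfx
        have hfind : (x :: t).find? (fun r => PySem.List.slice r none (some (-1)) == sfx) = some f := by
          rw [← List.head?_filter, hF]; rfl
        have hmem : f ∈ x :: t := List.mem_of_find?_eq_some hfind
        have hrem : (PySem.List.remove? (x :: t) f).getD (x :: t) = (x :: t).erase f := by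
          rw [PySem.List.remove?_eq_some_erase _ _ hmem]; rfl
        have hDsfx : d.getD sfx [] = fs.reverse ++ [f] := by rw [hinv sfx, hF]; simp
        obtain ⟨st, hg, hst⟩ : ∃ st, d.get? sfx = some st ∧ st = fs.reverse ++ [f] := by
          cases hg : d.get? sfx with
          | none => rw [hgetD, hg] at hDsfx; simp at hDsfx
          | some st => exact ⟨st, rfl, by rw [hgetD, hg] at hDsfx; simpa using hDsfx⟩
        have herase := pv_erase_filter (fun r => PySem.List.slice r none (some (-1)) == sfx) (x :: t) f hfind
        rw [pvALoop, pvBLoop, ← hsfx]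
        simp only [hfind, hrem, hg, hst]
        rw [show (fs.reverse ++ [f]).getLast? = some f by simp]
        rw [show (fs.reverse ++ [f]).dropLast = fs.reverse by simp]
        exact ih ((x :: t).erase f) _ single _
          (by rw [List.length_erase_of_mem hmem]; simpa using hn)
          (by
            intro p
            rw [PySem.Dict.getD_insert]
            by_cases hp : p = sfx
            · rw [if_pos hp, hp, herase.1, hF]; rfl
            · rw [if_neg hp, hinv p, herase.2 (fun r => PySem.List.slice r none (some (-1)) == p)
                (by
                  have hpf : PySem.List.slice f none (some (-1)) = sfx := by
                    have := List.find?_some hfind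
                    exact (beq_iff_eq).mp this
                  simp [hpf, Ne.symm hp])])

-- initial buckets: the fold over the reversed reads indexes them by prefix, reversed per bucket
theorem pv_buckets_init (L : List (List Char)) (p : List Char) :
    ((L.reverse).foldl
        (fun d r => d.modify (PySem.List.slice r none (some (-1))) [] (· ++ [r]))
        PySem.Dict.empty).getD p []
      = (L.filter (fun r => PySem.List.slice r none (some (-1)) == p)).reverse := by
  have hmap : (L.reverse).foldl
        (fun d r => d.modify (PySem.List.slice r none (some (-1))) [] (· ++ [r]))
        PySem.Dict.empty
      = ((L.reverse).map (fun r => (PySem.List.slice r none (some (-1)), r))).foldl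
        (fun d q => d.modify q.1 [] (· ++ [q.2])) PySem.Dict.empty := by
    rw [List.foldl_map]
  rw [hmap, PySem.Dict.getD_foldl_modify_append, PySem.Dict.getD_empty, List.filter_map,
    ← List.filter_reverse]
  simp [Function.comp_def]

-- ===== VERDICT (by name: the statement is the Claim_ definition above) =====
theorem CyclicChromosomes2_spec : Claim_equal_CyclicChromosomes2 := by
  intro reads _ hpre
  show CyclicChromosomes2 reads = CyclicChromosomes2_alt reads
  have hne : reads.map String.toList ≠ [] := by
    intro h; exact hpre.1 (List.map_eq_nil_iff.mp h)
  set rs := reads.map String.toList with hrs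
  have hsplit : rs.dropLast ++ [rs.getLast hne] = rs := List.dropLast_append_getLast hne
  have hpop : PySem.List.pop? rs (-1) = some (rs.getLast hne, rs.dropLast) := by
    conv_lhs => rw [← hsplit]
    exact PySem.List.pop?_last _ _
  have hlast? : rs.getLast? = some (rs.getLast hne) := List.getLast?_eq_some_getLast hne
  simp only [CyclicChromosomes2, CyclicChromosomes2_alt, ← hrs, hpop, hlast?]
  congr 1
  congr 1
  rw [PySem.List.slice_to_neg_one]
  have hlen : rs.length = rs.dropLast.length + 1 := by
    conv_lhs => rw [← hsplit]
    simp
  rw [hlen]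
  exact pv_loop_eq rs.dropLast.length rs.dropLast (rs.getLast hne) (rs.getLast hne).length _
    rfl (fun p => pv_buckets_init rs.dropLast p)
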